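-- pv_equiv track=rewrite | github.com/Ch3rry-Pi3-AI/LLMOps-Financial-Planner | backend/retirement/lambda_handler.py | _normalize_markdown_report
-- ===== SOURCE A (Python) =====
-- def _normalize_markdown_report(text: str) -> str:
--     """
--     Normalize agent-produced markdown for consistent UI rendering.
--
--     Removes conversational preambles and ensures the report starts at the
--     expected H1 header when present.
--     """
--     if not text:
--         return text
--
--     stripped = text.strip()
--
--     # Unwrap fenced markdown blocks if the model included them.
--     if stripped.startswith("```"):
--         lines = stripped.splitlines()
--         if lines and lines[0].startswith("```"):
--             try:
--                 end_idx = lines[1:].index("```") + 1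
--                 stripped = "\n".join(lines[1:end_idx]).strip()
--             except ValueError:
--                 stripped = "\n".join(lines[1:]).strip()
--
--     lines = stripped.splitlines()
--     target = "Retirement Readiness Assessment"
--
--     # Prefer starting from the expected title if it exists anywhere.
--     for idx, line in enumerate(lines):
--         candidate = line.lstrip("#").strip()
--         if candidate == target:
--             return "\n".join(lines[idx:]).lstrip()
--
--     # Otherwise, start from the first markdown heading.
--     for idx, line in enumerate(lines):
--         if line.lstrip().startswith("#"):
--             return "\n".join(lines[idx:]).lstrip()
--
--     return stripped
-- ===== SOURCE B (Python) =====
-- def _normalize_markdown_report(text: str) -> str: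
--     if not text:
--         return text
--
--     stripped = text.strip()
--
--     # Unwrap fenced markdown blocks if the model included them.
--     if stripped.startswith("```"):
--         lines = stripped.splitlines()
--         if lines and lines[0].startswith("```"):
--             try:
--                 end_idx = lines[1:].index("```") + 1
--                 stripped = "\n".join(lines[1:end_idx]).strip()
--             except ValueError:
--                 stripped = "\n".join(lines[1:]).strip()
--
--     lines = stripped.splitlines()
--     target = "Retirement Readiness Assessment"
--
--     # Single pass: return at the first title line; remember the first heading.
--     first_heading = None
--     for idx, line in enumerate(lines):
--         if line.lstrip("#").strip() == target:
--             return "\n".join(lines[idx:]).lstrip()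
--         if first_heading is None and line.lstrip().startswith("#"):
--             first_heading = idx
--
--     if first_heading is not None:
--         return "\n".join(lines[first_heading:]).lstrip()
--     return stripped
-- ===== Notes on version B (the rewrite author's own statement) =====
-- stated objective: alternative
-- what changed: The two sequential scans over the lines (one for the expected title, then a second from the start for the first heading) are fused into one pass that returns at the first title line and records the first heading index as it goes.
import Mathlib
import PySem

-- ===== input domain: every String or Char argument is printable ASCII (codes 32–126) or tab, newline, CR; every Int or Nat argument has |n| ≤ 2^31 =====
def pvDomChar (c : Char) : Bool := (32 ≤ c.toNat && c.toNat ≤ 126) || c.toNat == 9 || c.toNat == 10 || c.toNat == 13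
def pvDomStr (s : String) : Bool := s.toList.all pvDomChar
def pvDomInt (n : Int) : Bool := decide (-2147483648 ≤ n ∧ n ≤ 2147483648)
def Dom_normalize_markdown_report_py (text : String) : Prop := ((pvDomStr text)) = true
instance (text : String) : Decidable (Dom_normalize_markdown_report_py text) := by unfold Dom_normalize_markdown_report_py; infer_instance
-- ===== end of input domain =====

-- B fuses A's two sequential scans over the lines into one pass that returns at the
-- first title line and records the first heading index; objective: alternative.

-- ===== PORT A =====
def pvTarget : String := "Retirement Readiness Assessment"

-- line.lstrip("#"): dropping leading '#' chars is exact for the one-char set "#"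
def pvLstripHash (s : String) : String := String.ofList (s.toList.dropWhile (· == '#'))

-- line.lstrip("#").strip() == target  (shared expression of both Pythons)
def pvIsTitle (l : String) : Bool := PySem.Str.strip (pvLstripHash l) == pvTarget

-- line.lstrip().startswith("#")  (shared expression of both Pythons)
def pvIsHeading (l : String) : Bool := PySem.Str.startswith (PySem.Str.lstrip l) "#"

-- the shared preamble of A and B: strip, then unwrap a fenced ``` block.
-- lines[1:] is rest (index 1 is in range, match gives lines[0]); lines[1:end_idx]
-- with end_idx = rest.index("```")+1 is rest.take e — exact, indices nonnegative.
def pvPreprocess (text : String) : String :=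
  let stripped := PySem.Str.strip text
  if PySem.Str.startswith stripped "```" then
    match PySem.Str.splitlines stripped with
    | [] => stripped
    | l0 :: rest =>
      if PySem.Str.startswith l0 "```" then
        match PySem.List.index? rest "```" with
        | some e => PySem.Str.strip (PySem.Str.join "\n" (rest.take e))
        | none => PySem.Str.strip (PySem.Str.join "\n" rest)
      else stripped
  else stripped

-- A's first loop: return "\n".join(lines[idx:]).lstrip() at the first title line
def pvTitleLoopA : List String → Option String
  | [] => none
  | l :: rest =>
    if pvIsTitle l then some (PySem.Str.lstrip (PySem.Str.join "\n" (l :: rest)))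
    else pvTitleLoopA rest

-- A's second loop: same, at the first markdown heading
def pvHeadLoopA : List String → Option String
  | [] => none
  | l :: rest =>
    if pvIsHeading l then some (PySem.Str.lstrip (PySem.Str.join "\n" (l :: rest)))
    else pvHeadLoopA rest

def normalize_markdown_report_py (text : String) : String :=
  if text == "" then text
  else
    let stripped := pvPreprocess text
    let lines := PySem.Str.splitlines stripped
    match pvTitleLoopA lines with
    | some r => r
    | none =>
      match pvHeadLoopA lines with
      | some r => r
      | none => stripped

-- ===== PORT B =====
-- B's single pass: rem is the unprocessed suffix lines[idx:], fh = first_heading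
def pvScanB (stripped : String) (lines : List String) :
    List String → Nat → Option Nat → String
  | [], _, fh =>
    match fh with
    | some h => PySem.Str.lstrip (PySem.Str.join "\n" (lines.drop h))
    | none => stripped
  | l :: rest, idx, fh =>
    if pvIsTitle l then PySem.Str.lstrip (PySem.Str.join "\n" (lines.drop idx))
    else pvScanB stripped lines rest (idx + 1)
      (if fh.isNone && pvIsHeading l then some idx else fh)

def normalize_markdown_report_py_alt (text : String) : String :=
  if text == "" then text
  else
    let stripped := pvPreprocess text
    let lines := PySem.Str.splitlines stripped
    pvScanB stripped lines lines 0 none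

-- ===== PRECONDITION & SPEC =====
def Spec_normalize_markdown_report_py (text : String) (out : String) : Prop := out = normalize_markdown_report_py_alt text
instance (text : String) (out : String) : Decidable (Spec_normalize_markdown_report_py text out) := by unfold Spec_normalize_markdown_report_py; infer_instance

-- ===== CLAIM (what is proved, stated in full; the proofs are below) =====
def Claim_equal_normalize_markdown_report_py : Prop := ∀ (text : String), Dom_normalize_markdown_report_py text → Spec_normalize_markdown_report_py text (normalize_markdown_report_py text)

-- ===== LEMMAS AND PROOFS =====

lemma pvScanB_spec (stripped : String) (lines : List String) :
    ∀ (rem : List String) (idx : Nat) (fh : Option Nat), rem = lines.drop idx →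
    pvScanB stripped lines rem idx fh =
      match pvTitleLoopA rem with
      | some r => r
      | none =>
        match fh with
        | some h => PySem.Str.lstrip (PySem.Str.join "\n" (lines.drop h))
        | none =>
          match pvHeadLoopA rem with
          | some r => r
          | none => stripped := by
  intro rem
  induction rem with
  | nil =>
    intro idx fh _
    cases fh <;> simp [pvScanB, pvTitleLoopA, pvHeadLoopA]
  | cons l rest ih =>
    intro idx fh hrem
    have hrest : rest = lines.drop (idx + 1) := by
      have := congrArg (List.drop 1) hrem
      simpa [List.drop_drop, Nat.add_comm] using this
    by_cases ht : pvIsTitle l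
    · simp [pvScanB, pvTitleLoopA, ht, ← hrem]
    · rw [show pvScanB stripped lines (l :: rest) idx fh =
          pvScanB stripped lines rest (idx + 1)
            (if fh.isNone && pvIsHeading l then some idx else fh) by
          simp [pvScanB, ht]]
      rw [ih (idx + 1) _ hrest]
      cases fh with
      | some h => simp [pvTitleLoopA, ht]
      | none =>
        by_cases hh : pvIsHeading l
        · simp [pvTitleLoopA, pvHeadLoopA, ht, hh, ← hrem]
        · simp [pvTitleLoopA, pvHeadLoopA, ht, hh]

-- ===== VERDICT (by name: the statement is the Claim_ definition above) =====
theorem normalize_markdown_report_py_spec : Claim_equal_normalize_markdown_report_py := by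
  intro text _
  unfold Spec_normalize_markdown_report_py normalize_markdown_report_py normalize_markdown_report_py_alt
  by_cases h : text == ""
  · simp [h]
  · simp only [h]
    rw [pvScanB_spec _ _ _ 0 none (by simp)]
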